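-- pv_equiv track=rewrite | github.com/bobbobow2/BV_BIOCAD | pipeline.py | rate3
-- ===== SOURCE A (Python) =====
-- def rate3(s1, s2):
--     s = ('H', 'R', 'K')
--     k = 0
--     for i in s1:
--         if i in s:
--             k += 1
--     for i in s2:
--         if i in s:
--             k += 1
--     return k
-- ===== SOURCE B (Python) =====
-- def rate3(s1, s2):
--     freq = {}
--     for i in s1 + s2:
--         freq[i] = freq.get(i, 0) + 1
--     return freq.get('H', 0) + freq.get('R', 0) + freq.get('K', 0)
-- ===== Notes on version B (the rewrite author's own statement) =====
-- stated objective: alternative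
-- what changed: Builds a full frequency table (histogram dict) of the merged sequences in one pass with no per-element membership test, then returns the sum of three fixed key lookups, instead of A's two membership-guarded counting loops.
import Mathlib
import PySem

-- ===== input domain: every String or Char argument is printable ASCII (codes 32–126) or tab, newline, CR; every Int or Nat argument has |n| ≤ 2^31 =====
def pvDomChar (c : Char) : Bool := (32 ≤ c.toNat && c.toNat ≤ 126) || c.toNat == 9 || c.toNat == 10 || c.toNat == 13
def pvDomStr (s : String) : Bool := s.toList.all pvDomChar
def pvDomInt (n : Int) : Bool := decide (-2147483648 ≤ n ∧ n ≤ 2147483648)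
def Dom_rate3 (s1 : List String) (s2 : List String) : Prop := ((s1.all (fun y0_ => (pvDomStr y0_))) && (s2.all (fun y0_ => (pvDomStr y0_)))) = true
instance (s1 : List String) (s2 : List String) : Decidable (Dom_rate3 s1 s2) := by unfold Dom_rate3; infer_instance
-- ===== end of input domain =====

-- B builds a frequency table of the merged sequences once and sums three fixed key lookups, instead of A's membership-guarded loops (alternative decomposition; same value).

-- ===== PORT A =====
-- s = ('H','R','K'); k = 0; for i in s1: if i in s: k += 1; for i in s2: likewise; return k
def rate3 (s1 : List String) (s2 : List String) : Int :=
  let s : List String := ["H", "R", "K"]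
  let k : Int := 0
  let k := s1.foldl (fun k i => if s.contains i then k + 1 else k) k
  let k := s2.foldl (fun k i => if s.contains i then k + 1 else k) k
  k

-- ===== PORT B =====
-- freq = {}; for i in s1 + s2: freq[i] = freq.get(i, 0) + 1  — this loop is exactly PySem.Dict.counter
-- return freq.get('H', 0) + freq.get('R', 0) + freq.get('K', 0)
def rate3_alt (s1 : List String) (s2 : List String) : Int :=
  let freq := PySem.Dict.counter (s1 ++ s2)
  freq.getD "H" 0 + freq.getD "R" 0 + freq.getD "K" 0

-- ===== PRECONDITION & SPEC =====
def Spec_rate3 (s1 : List String) (s2 : List String) (out : Int) : Prop := out = rate3_alt s1 s2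
instance (s1 : List String) (s2 : List String) (out : Int) : Decidable (Spec_rate3 s1 s2 out) := by unfold Spec_rate3; infer_instance

-- ===== CLAIM =====
def Claim_equal_rate3 : Prop := ∀ (s1 : List String) (s2 : List String), Dom_rate3 s1 s2 → Spec_rate3 s1 s2 (rate3 s1 s2)

-- ===== LEMMAS AND PROOFS =====

-- A's membership-guarded loop adds exactly the three per-key counts.
theorem rate3_loop_counts (l : List String) (a : Int) :
    l.foldl (fun k i => if (["H", "R", "K"] : List String).contains i then k + 1 else k) a
      = a + (l.count "H" : Int) + (l.count "R" : Int) + (l.count "K" : Int) := by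
  induction l generalizing a with
  | nil => simp
  | cons x xs ih =>
    simp only [List.foldl_cons, List.count_cons, ih]
    by_cases hH : x = "H" <;> by_cases hR : x = "R" <;> by_cases hK : x = "K" <;>
      simp_all <;> ring

-- ===== VERDICT =====
theorem rate3_spec : Claim_equal_rate3 := by
  intro s1 s2 _
  unfold Spec_rate3 rate3 rate3_alt
  simp only [rate3_loop_counts, PySem.Dict.getD_counter, List.count_append]
  push_cast
  ring
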